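-- pv_equiv track=rewrite | github.com/Darf700/Clasificacion-de-Videos | video_intelligence/modules/metadata_extractor.py | _extract_creation_date
-- ===== SOURCE A (Python) =====
-- from typing import Any, Dict, Optional
--
-- def _extract_creation_date(tags: Dict[str, str]) -> Optional[str]:
--     """Extract creation date from metadata tags.
--
--     Args:
--         tags: Dictionary of metadata tags.
--
--     Returns:
--         ISO format date string, or None if not found.
--     """
--     date_keys = [
--         "creation_time",
--         "date",
--         "com.apple.quicktime.creationdate",
--     ]
--
--     for key in date_keys:
--         for tag_key, tag_value in tags.items():
--             if tag_key.lower() == key.lower() and tag_value: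
--                 return tag_value.strip()
--
--     return None
-- ===== SOURCE B (Python) =====
-- def _extract_creation_date(tags):
--     prio = {
--         "creation_time": 0,
--         "date": 1,
--         "com.apple.quicktime.creationdate": 2,
--     }
--     best = None  # (priority, raw value)
--     for tag_key, tag_value in tags.items():
--         p = prio.get(tag_key.lower())
--         if p is not None and tag_value and (best is None or p < best[0]):
--             best = (p, tag_value)
--     return best[1].strip() if best is not None else None
-- ===== Notes on version B (the rewrite author's own statement) =====
-- stated objective: alternative
-- what changed: Replaces the nested key-priority-outer / tags-inner double scan by a single pass over the tags that tracks the best (lowest-priority) truthy match via a priority map, stripping only at the end.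
import Mathlib
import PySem

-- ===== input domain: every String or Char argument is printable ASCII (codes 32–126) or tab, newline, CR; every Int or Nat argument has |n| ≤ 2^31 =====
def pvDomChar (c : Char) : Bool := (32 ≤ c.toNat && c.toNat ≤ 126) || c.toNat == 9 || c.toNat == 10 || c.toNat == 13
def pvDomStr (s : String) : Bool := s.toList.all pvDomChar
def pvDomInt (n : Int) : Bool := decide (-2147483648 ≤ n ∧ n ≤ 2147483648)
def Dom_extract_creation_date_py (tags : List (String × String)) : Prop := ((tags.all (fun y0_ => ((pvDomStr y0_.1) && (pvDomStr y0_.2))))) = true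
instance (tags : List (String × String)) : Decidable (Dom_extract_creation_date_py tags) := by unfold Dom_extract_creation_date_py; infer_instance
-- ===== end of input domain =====

-- B replaces A's key-outer/tags-inner double scan by one pass over the tags keeping the lowest-priority truthy match (alternative decomposition).

-- ===== PORT A =====
-- inner loop: 'for tag_key, tag_value in tags.items(): if tag_key.lower() == key.lower() and tag_value: return tag_value.strip()'
def pvAInner (key : String) : List (String × String) → Option String
  | [] => none
  | (tk, tv) :: rest =>
      if PySem.Str.lower tk = PySem.Str.lower key ∧ tv ≠ "" then some (PySem.Str.strip tv)
      else pvAInner key rest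

-- outer loop: 'for key in date_keys: …'
def pvAOuter (tags : List (String × String)) : List String → Option String
  | [] => none
  | key :: ks =>
      match pvAInner key tags with
      | some v => some v
      | none => pvAOuter tags ks

def extract_creation_date_py (tags : List (String × String)) : Option String :=
  pvAOuter tags ["creation_time", "date", "com.apple.quicktime.creationdate"]

-- ===== PORT B =====
-- 'prio.get(tag_key.lower())'
def pvPrio (s : String) : Option Nat :=
  if s = "creation_time" then some 0
  else if s = "date" then some 1
  else if s = "com.apple.quicktime.creationdate" then some 2
  else none

-- loop body: 'if p is not None and tag_value and (best is None or p < best[0]): best = (p, tag_value)'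
def pvBStep (best : Option (Nat × String)) (kv : String × String) : Option (Nat × String) :=
  match pvPrio (PySem.Str.lower kv.1), best with
  | some p, none => if kv.2 ≠ "" then some (p, kv.2) else none
  | some p, some b => if kv.2 ≠ "" ∧ p < b.1 then some (p, kv.2) else some b
  | none, b => b

def extract_creation_date_py_alt (tags : List (String × String)) : Option String :=
  match tags.foldl pvBStep none with
  | some b => some (PySem.Str.strip b.2)
  | none => none

-- ===== PRECONDITION & SPEC =====
def Spec_extract_creation_date_py (tags : List (String × String)) (out : Option String) : Prop := out = extract_creation_date_py_alt tags
instance (tags : List (String × String)) (out : Option String) : Decidable (Spec_extract_creation_date_py tags out) := by unfold Spec_extract_creation_date_py; infer_instance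

-- ===== CLAIM (what is proved, stated in full; the proofs are below) =====
def Claim_equal_extract_creation_date_py : Prop := ∀ (tags : List (String × String)), Dom_extract_creation_date_py tags → Spec_extract_creation_date_py tags (extract_creation_date_py tags)

-- ===== LEMMAS AND PROOFS =====

-- first raw value in tags matching priority p
def pvFirstAt (p : Nat) : List (String × String) → Option String
  | [] => none
  | (k, v) :: rest =>
      if pvPrio (PySem.Str.lower k) = some p ∧ v ≠ "" then some v else pvFirstAt p rest

-- the best (lowest-priority, first within its priority) raw match
def pvBest (tags : List (String × String)) : Option (Nat × String) :=
  match pvFirstAt 0 tags with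
  | some v => some (0, v)
  | none =>
    match pvFirstAt 1 tags with
    | some v => some (1, v)
    | none =>
      match pvFirstAt 2 tags with
      | some v => some (2, v)
      | none => none

theorem pvPrio_le_two {s : String} {p : Nat} (h : pvPrio s = some p) : p ≤ 2 := by
  unfold pvPrio at h
  split_ifs at h <;> simp_all <;> omega

theorem pvBest_cons_skip {k v : String} {rest : List (String × String)}
    (h : pvPrio (PySem.Str.lower k) = none ∨ v = "") :
    pvBest ((k, v) :: rest) = pvBest rest := by
  have h' : ∀ p, pvFirstAt p ((k, v) :: rest) = pvFirstAt p rest := by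
    intro p
    simp only [pvFirstAt]
    rcases h with h | h
    · simp [h]
    · simp [h]
  simp only [pvBest, h']

theorem pvBest_cons_match {k v : String} {rest : List (String × String)} {p : Nat}
    (hp : pvPrio (PySem.Str.lower k) = some p) (hv : v ≠ "") :
    pvBest ((k, v) :: rest) =
      match pvBest rest with
      | some b => if b.1 < p then some b else some (p, v)
      | none => some (p, v) := by
  have e : ∀ q, pvFirstAt q ((k, v) :: rest) = if p = q then some v else pvFirstAt q rest := by
    intro q
    simp only [pvFirstAt, hp]
    simp [hv]
  have hp2 : p ≤ 2 := pvPrio_le_two hp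
  unfold pvBest
  rw [e 0, e 1, e 2]
  interval_cases p <;>
    cases h0 : pvFirstAt 0 rest <;> cases h1 : pvFirstAt 1 rest <;> cases h2 : pvFirstAt 2 rest <;>
      simp

theorem pvFold_some (l : List (String × String)) :
    ∀ s : Nat × String, l.foldl pvBStep (some s) =
      match pvBest l with
      | some b => if b.1 < s.1 then some b else some s
      | none => some s := by
  induction l with
  | nil => intro s; simp [pvBest, pvFirstAt]
  | cons kv rest ih =>
    intro s
    obtain ⟨k, v⟩ := kv
    simp only [List.foldl_cons]
    by_cases hv : v = ""
    · have hs : pvBStep (some s) (k, v) = some s := by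
        unfold pvBStep; cases pvPrio (PySem.Str.lower k) <;> simp_all
      rw [hs, ih, pvBest_cons_skip (Or.inr hv)]
    · cases hp : pvPrio (PySem.Str.lower k) with
      | none =>
        have hs : pvBStep (some s) (k, v) = some s := by simp [pvBStep, hp]
        rw [hs, ih, pvBest_cons_skip (Or.inl hp)]
      | some p =>
        rw [pvBest_cons_match hp hv]
        by_cases hlt : p < s.1
        · have hs : pvBStep (some s) (k, v) = some (p, v) := by
            simp [pvBStep, hp, hv, hlt]
          rw [hs, ih]
          cases hb : pvBest rest with
          | none => simp [hlt]
          | some b =>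
            by_cases hbp : b.1 < p <;> simp [hbp, hlt] <;> omega
        · have hs : pvBStep (some s) (k, v) = some s := by
            simp [pvBStep, hp, hv, hlt]
          rw [hs, ih]
          cases hb : pvBest rest with
          | none => simp [hlt]
          | some b =>
            by_cases hbp : b.1 < p <;> by_cases hbs : b.1 < s.1 <;>
              simp [hbp, hbs, hlt] <;> omega

theorem pvFold_none (l : List (String × String)) :
    l.foldl pvBStep none = pvBest l := by
  induction l with
  | nil => simp [pvBest, pvFirstAt]
  | cons kv rest ih =>
    obtain ⟨k, v⟩ := kv
    simp only [List.foldl_cons]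
    by_cases hv : v = ""
    · have hs : pvBStep none (k, v) = none := by
        unfold pvBStep; cases pvPrio (PySem.Str.lower k) <;> simp_all
      rw [hs, ih, pvBest_cons_skip (Or.inr hv)]
    · cases hp : pvPrio (PySem.Str.lower k) with
      | none =>
        have hs : pvBStep none (k, v) = none := by simp [pvBStep, hp]
        rw [hs, ih, pvBest_cons_skip (Or.inl hp)]
      | some p =>
        have hs : pvBStep none (k, v) = some (p, v) := by simp [pvBStep, hp, hv]
        rw [hs, pvFold_some, pvBest_cons_match hp hv]

theorem pvInner_zero (l : List (String × String)) :
    pvAInner "creation_time" l = (pvFirstAt 0 l).map PySem.Str.strip := by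
  induction l with
  | nil => simp [pvAInner, pvFirstAt]
  | cons kv rest ih =>
    obtain ⟨k, v⟩ := kv
    have hk : PySem.Str.lower "creation_time" = "creation_time" := by decide
    have : (pvPrio (PySem.Str.lower k) = some 0) ↔ (PySem.Str.lower k = "creation_time") := by
      unfold pvPrio; split_ifs <;> simp_all
    simp only [pvAInner, pvFirstAt, hk, this]
    split_ifs <;> simp_all

theorem pvInner_one (l : List (String × String)) :
    pvAInner "date" l = (pvFirstAt 1 l).map PySem.Str.strip := by
  induction l with
  | nil => simp [pvAInner, pvFirstAt]
  | cons kv rest ih =>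
    obtain ⟨k, v⟩ := kv
    have hk : PySem.Str.lower "date" = "date" := by decide
    have : (pvPrio (PySem.Str.lower k) = some 1) ↔ (PySem.Str.lower k = "date") := by
      unfold pvPrio; split_ifs <;> simp_all
    simp only [pvAInner, pvFirstAt, hk, this]
    split_ifs <;> simp_all

theorem pvInner_two (l : List (String × String)) :
    pvAInner "com.apple.quicktime.creationdate" l = (pvFirstAt 2 l).map PySem.Str.strip := by
  induction l with
  | nil => simp [pvAInner, pvFirstAt]
  | cons kv rest ih =>
    obtain ⟨k, v⟩ := kv
    have hk : PySem.Str.lower "com.apple.quicktime.creationdate" = "com.apple.quicktime.creationdate" := by decide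
    have : (pvPrio (PySem.Str.lower k) = some 2) ↔ (PySem.Str.lower k = "com.apple.quicktime.creationdate") := by
      unfold pvPrio; split_ifs <;> simp_all
    simp only [pvAInner, pvFirstAt, hk, this]
    split_ifs <;> simp_all

-- ===== VERDICT (by name: the statement is the Claim_ definition above) =====
theorem extract_creation_date_py_spec : Claim_equal_extract_creation_date_py := by
  intro tags _
  unfold Spec_extract_creation_date_py extract_creation_date_py extract_creation_date_py_alt
  rw [pvFold_none]
  simp only [pvAOuter, pvInner_zero, pvInner_one, pvInner_two, pvBest]
  cases pvFirstAt 0 tags <;> cases pvFirstAt 1 tags <;> cases pvFirstAt 2 tags <;> simp
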